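-- pv_equiv track=rewrite | github.com/santhoshtr/wq | utils.py | find_paragraph
-- ===== SOURCE A (Python) =====
-- def find_paragraph(text, position):
--     # Split the text into paragraphs
--     paragraphs = text.split("\n")
--
--     # Find the paragraph that contains the given position
--     for i, paragraph in enumerate(paragraphs):
--         if position < len(paragraph):
--             break
--         position -= len(paragraph) + 1
--
--     # Determine the start and end positions of the paragraph
--     start = sum(len(paragraphs[j]) + 1 for j in range(i))
--     end = start + len(paragraphs[i])
--
--     return start, end
-- ===== SOURCE B (Python) =====
-- def find_paragraph(text, position):
--     # One pass builds a cumulative-ends table; a binary search replaces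
--     # A's linear decrement scan (clamped to the last paragraph).
--     paragraphs = text.split("\n")
--     ends = []
--     total = 0
--     for p in paragraphs:
--         total += len(p)
--         ends.append(total)
--         total += 1
--     lo, hi = 0, len(paragraphs) - 1
--     while lo < hi:
--         mid = (lo + hi) // 2
--         if position < ends[mid]:
--             hi = mid
--         else:
--             lo = mid + 1
--     end = ends[lo]
--     start = end - len(paragraphs[lo])
--     return start, end
-- ===== Notes on version B (the rewrite author's own statement) =====
-- stated objective: alternative
-- what changed: A's linear decrement scan over paragraphs plus an O(i) re-summation of prefix lengths is replaced by building a cumulative paragraph-end table in one pass and locating the owning paragraph with a binary search, recovering start/end directly from the table.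
import Mathlib
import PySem

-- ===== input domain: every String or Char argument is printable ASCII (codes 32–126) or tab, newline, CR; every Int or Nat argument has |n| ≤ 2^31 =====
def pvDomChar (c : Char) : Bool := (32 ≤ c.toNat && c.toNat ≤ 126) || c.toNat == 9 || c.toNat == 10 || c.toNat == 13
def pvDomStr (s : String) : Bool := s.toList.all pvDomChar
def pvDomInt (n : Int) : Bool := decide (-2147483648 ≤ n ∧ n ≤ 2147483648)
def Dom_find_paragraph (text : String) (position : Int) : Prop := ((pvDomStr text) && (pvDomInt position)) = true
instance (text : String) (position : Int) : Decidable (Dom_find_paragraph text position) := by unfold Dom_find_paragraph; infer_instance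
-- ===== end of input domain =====

-- B replaces A's linear decrement scan and prefix re-summation by a cumulative-ends
-- table plus a hand-written binary search (objective: alternative algorithm).

-- ===== PORT A =====
-- the 'for i, paragraph in enumerate(paragraphs): if position < len(paragraph): break; position -= len(paragraph)+1'
-- loop: returns the break index i (Python leaves i at the last index when the loop runs out)
def pvLoopA : List (List Char) → Int → Nat
  | [], _ => 0
  | p :: rest, pos =>
    if pos < PySem.Chars.len p then 0
    else match rest with
      | [] => 0          -- loop exhausted without break: i stays at the last index
      | _ :: _ => pvLoopA rest (pos - PySem.Chars.len p - 1) + 1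

def find_paragraph (text : String) (position : Int) : Int × Int :=
  let paragraphs := PySem.Chars.splitOn text.toList ['\n']   -- text.split("\n"); sep ≠ "" so split never raises
  let i := pvLoopA paragraphs position
  -- sum(len(paragraphs[j]) + 1 for j in range(i)); each j < i ≤ len(paragraphs) is in range, so getD is exact
  let start := ((List.range i).map (fun j => PySem.Chars.len (paragraphs.getD j []) + 1)).sum
  -- paragraphs[i]: i is always < len(paragraphs) (split yields a nonempty list), so getD is exact
  let endp := start + PySem.Chars.len (paragraphs.getD i [])
  (start, endp)

-- ===== PORT B =====
-- the 'for p in paragraphs: total += len(p); ends.append(total); total += 1' loop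
def pvEndsB : List (List Char) → Int → List Int
  | [], _ => []
  | p :: rest, total => (total + PySem.Chars.len p) :: pvEndsB rest (total + PySem.Chars.len p + 1)

-- the 'while lo < hi' binary search; lo, hi are list indices (nonnegative in Python), so Nat;
-- (lo+hi)//2 on nonnegative ints is Nat division; ends[mid] is in range (lo ≤ mid < hi ≤ len-1), so getD is exact
def pvSearchB (ends : List Int) (position : Int) (lo hi : Nat) : Nat :=
  if _h : lo < hi then
    if position < ends.getD ((lo + hi) / 2) 0 then pvSearchB ends position lo ((lo + hi) / 2)
    else pvSearchB ends position ((lo + hi) / 2 + 1) hi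
  else lo
termination_by hi - lo
decreasing_by all_goals omega

def find_paragraph_alt (text : String) (position : Int) : Int × Int :=
  let paragraphs := PySem.Chars.splitOn text.toList ['\n']
  let ends := pvEndsB paragraphs 0
  let lo := pvSearchB ends position 0 (paragraphs.length - 1)
  let endp := ends.getD lo 0          -- lo ≤ len(paragraphs)-1, in range
  let start := endp - PySem.Chars.len (paragraphs.getD lo [])
  (start, endp)

-- ===== PRECONDITION & SPEC =====
def Spec_find_paragraph (text : String) (position : Int) (out : Int × Int) : Prop := out = find_paragraph_alt text position
instance (text : String) (position : Int) (out : Int × Int) : Decidable (Spec_find_paragraph text position out) := by unfold Spec_find_paragraph; infer_instance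

-- ===== CLAIM (what is proved, stated in full; the proofs are below) =====
def Claim_equal_find_paragraph : Prop := ∀ (text : String) (position : Int), Dom_find_paragraph text position → Spec_find_paragraph text position (find_paragraph text position)

-- ===== LEMMAS AND PROOFS =====

-- reference function: first index i with pos < ends[i], clamped to the last index
def cFirst : List Int → Int → Nat
  | [], _ => 0
  | [_], _ => 0
  | e :: rest, pos => if pos < e then 0 else cFirst rest pos + 1

-- prefix sum of paragraph lengths + 1 (character offset of paragraph i)
def pSum (ps : List (List Char)) (i : Nat) : Int :=
  ((ps.take i).map (fun p => PySem.Chars.len p + 1)).sum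

theorem cFirst_cons (e : Int) (rest : List Int) (h : rest ≠ []) (pos : Int) :
    cFirst (e :: rest) pos = if pos < e then 0 else cFirst rest pos + 1 := by
  cases rest with
  | nil => exact absurd rfl h
  | cons f rs => rfl

theorem pvEndsB_length (ps : List (List Char)) (t : Int) : (pvEndsB ps t).length = ps.length := by
  induction ps generalizing t with
  | nil => rfl
  | cons p rest ih => simp [pvEndsB, ih]

theorem pvEndsB_ne_nil (p : List Char) (rest : List (List Char)) (t : Int) :
    pvEndsB (p :: rest) t ≠ [] := by simp [pvEndsB]

theorem pvEndsB_shift (ps : List (List Char)) (t : Int) :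
    pvEndsB ps t = (pvEndsB ps 0).map (t + ·) := by
  induction ps generalizing t with
  | nil => rfl
  | cons p rest ih =>
    simp only [pvEndsB, List.map]
    rw [ih (t + PySem.Chars.len p + 1), ih (0 + PySem.Chars.len p + 1), List.map_map]
    congr 1
    · ring
    · apply List.map_congr_left
      intro a _
      simp only [Function.comp]
      ring

theorem cFirst_shift (es : List Int) (c pos : Int) :
    cFirst (es.map (c + ·)) pos = cFirst es (pos - c) := by
  induction es generalizing pos with
  | nil => rfl
  | cons e rest ih =>
    cases rest with
    | nil => rfl
    | cons f rs =>
      have h1 : (e :: f :: rs).map (c + ·) = (c + e) :: (f :: rs).map (c + ·) := rfl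
      rw [h1, cFirst_cons (c + e) ((f :: rs).map (c + ·)) (by simp) pos,
        cFirst_cons e (f :: rs) (by simp) (pos - c), ih]
      have h2 : pos < c + e ↔ pos - c < e := by omega
      simp [h2]

theorem pvLoopA_eq_cFirst (ps : List (List Char)) (pos : Int) :
    pvLoopA ps pos = cFirst (pvEndsB ps 0) pos := by
  induction ps generalizing pos with
  | nil => rfl
  | cons p rest ih =>
    cases rest with
    | nil => simp [pvLoopA, pvEndsB, cFirst]
    | cons q rs =>
      have h1 : pvLoopA (p :: q :: rs) pos =
          if pos < PySem.Chars.len p then 0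
          else pvLoopA (q :: rs) (pos - PySem.Chars.len p - 1) + 1 := rfl
      have h2 : pvEndsB (p :: q :: rs) 0 =
          (0 + PySem.Chars.len p) :: pvEndsB (q :: rs) (0 + PySem.Chars.len p + 1) := rfl
      rw [h1, h2, cFirst_cons _ _ (pvEndsB_ne_nil _ _ _) pos,
        pvEndsB_shift (q :: rs), cFirst_shift, ih]
      have e1 : pos - (0 + PySem.Chars.len p + 1) = pos - PySem.Chars.len p - 1 := by ring
      have e2 : (0 : Int) + PySem.Chars.len p = PySem.Chars.len p := by ring
      rw [e1, e2]

theorem cFirst_le (es : List Int) (pos : Int) : cFirst es pos ≤ es.length - 1 := by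
  induction es generalizing pos with
  | nil => simp [cFirst]
  | cons e rest ih =>
    cases rest with
    | nil => simp [cFirst]
    | cons f rs =>
      rw [cFirst_cons e (f :: rs) (by simp) pos]
      have := ih pos
      simp only [List.length_cons] at this ⊢
      split_ifs <;> omega

theorem cFirst_before (es : List Int) (pos : Int) :
    ∀ k < cFirst es pos, es.getD k 0 ≤ pos := by
  induction es generalizing pos with
  | nil => simp [cFirst]
  | cons e rest ih =>
    cases rest with
    | nil => simp [cFirst]
    | cons f rs =>
      intro k hk
      rw [cFirst_cons _ _ (by simp) pos] at hk
      by_cases h : pos < e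
      · simp [h] at hk
      · simp [h] at hk
        cases k with
        | zero => simpa using not_lt.mp h
        | succ k' => simpa using ih pos k' (by omega)

theorem cFirst_stop (es : List Int) (pos : Int) (h : cFirst es pos < es.length - 1) :
    pos < es.getD (cFirst es pos) 0 := by
  induction es generalizing pos with
  | nil => simp [cFirst] at h
  | cons e rest ih =>
    cases rest with
    | nil => simp [cFirst] at h
    | cons f rs =>
      rw [cFirst_cons _ _ (by simp) pos] at h ⊢
      by_cases hlt : pos < e
      · simp [hlt]
      · simp only [hlt, if_false]
        have := ih pos (by simp only [hlt, if_false, List.length_cons] at h ⊢; omega)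
        simpa using this

theorem pvEndsB_lb (ps : List (List Char)) (t : Int) :
    ∀ k < ps.length, t ≤ (pvEndsB ps t).getD k 0 := by
  induction ps generalizing t with
  | nil => simp
  | cons p rest ih =>
    intro k hk
    cases k with
    | zero =>
      have : (0:Int) ≤ PySem.Chars.len p := by simp [PySem.Chars.len]
      simp only [pvEndsB, List.getD_cons_zero]
      omega
    | succ k' =>
      have h := ih (t + PySem.Chars.len p + 1) k' (by simp only [List.length_cons] at hk; omega)
      have : (0:Int) ≤ PySem.Chars.len p := by simp [PySem.Chars.len]
      simp only [pvEndsB, List.getD_cons_succ]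
      omega

theorem pvEndsB_mono (ps : List (List Char)) (t : Int) :
    ∀ i j, i ≤ j → j < ps.length →
      (pvEndsB ps t).getD i 0 ≤ (pvEndsB ps t).getD j 0 := by
  induction ps generalizing t with
  | nil => simp
  | cons p rest ih =>
    intro i j hij hj
    cases i with
    | zero =>
      cases j with
      | zero => exact le_refl _
      | succ j' =>
        have h := pvEndsB_lb rest (t + PySem.Chars.len p + 1) j' (by simpa using hj)
        simp only [pvEndsB, List.getD_cons_zero, List.getD_cons_succ]
        omega
    | succ i' =>
      cases j with
      | zero => omega
      | succ j' =>
        simp only [pvEndsB, List.getD_cons_succ]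
        exact ih _ i' j' (by omega) (by simpa using hj)

theorem search_eq (es : List Int) (pos : Int) (r : Nat)
    (hmem : ∀ k < r, es.getD k 0 ≤ pos)
    (hstop : r < es.length - 1 → pos < es.getD r 0)
    (hmono : ∀ i j, i ≤ j → j < es.length → es.getD i 0 ≤ es.getD j 0)
    (lo hi : Nat) (h1 : lo ≤ r) (h2 : r ≤ hi) (h3 : hi ≤ es.length - 1) :
    pvSearchB es pos lo hi = r := by
  rw [pvSearchB]
  split_ifs with hlh hmid
  · -- pos < es[mid]: r ≤ mid
    have hrm : r ≤ (lo + hi) / 2 := by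
      by_contra hc
      have := hmem ((lo + hi) / 2) (by omega)
      omega
    exact search_eq es pos r hmem hstop hmono lo ((lo + hi) / 2) h1 hrm (by omega)
  · -- es[mid] ≤ pos: mid + 1 ≤ r
    have hml : (lo + hi) / 2 + 1 ≤ r := by
      by_contra hc
      have hr : r ≤ (lo + hi) / 2 := by omega
      have hrlt : r < es.length - 1 := by omega
      have h4 := hstop hrlt
      have h5 := hmono r ((lo + hi) / 2) hr (by omega)
      omega
    exact search_eq es pos r hmem hstop hmono ((lo + hi) / 2 + 1) hi hml (by omega) h3
  · omega
termination_by hi - lo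
decreasing_by all_goals omega

theorem pSum_succ (ps : List (List Char)) (i : Nat) (h : i < ps.length) :
    pSum ps (i + 1) = pSum ps i + (PySem.Chars.len (ps.getD i []) + 1) := by
  unfold pSum
  rw [List.take_add_one]
  simp [List.getD, h]

theorem sumRange_eq_pSum (ps : List (List Char)) (i : Nat) (h : i ≤ ps.length) :
    ((List.range i).map (fun j => PySem.Chars.len (ps.getD j []) + 1)).sum = pSum ps i := by
  induction i with
  | zero => simp [pSum]
  | succ i' ih =>
    rw [List.range_succ]
    simp only [List.map_append, List.sum_append, List.map_cons, List.map_nil, List.sum_cons,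
      List.sum_nil]
    rw [ih (by omega), pSum_succ ps i' (by omega)]
    ring

theorem pvEndsB_getD (ps : List (List Char)) :
    ∀ (i : Nat) (t : Int), i < ps.length →
      (pvEndsB ps t).getD i 0 = t + pSum ps i + PySem.Chars.len (ps.getD i []) := by
  induction ps with
  | nil => simp
  | cons p rest ih =>
    intro i t hi
    cases i with
    | zero => simp [pvEndsB, pSum]
    | succ i' =>
      simp only [pvEndsB, List.getD_cons_succ]
      rw [ih i' (t + PySem.Chars.len p + 1) (by simpa using hi)]
      have : pSum (p :: rest) (i' + 1) = (PySem.Chars.len p + 1) + pSum rest i' := by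
        unfold pSum
        simp [List.take_succ_cons]
      rw [this]
      ring

-- the two bodies agree for every paragraph list
theorem bodies_eq (ps : List (List Char)) (pos : Int) :
    (let i := pvLoopA ps pos
     let start := ((List.range i).map (fun j => PySem.Chars.len (ps.getD j []) + 1)).sum
     let endp := start + PySem.Chars.len (ps.getD i [])
     ((start, endp) : Int × Int))
    = (let ends := pvEndsB ps 0
       let lo := pvSearchB ends pos 0 (ps.length - 1)
       let endp := ends.getD lo 0
       let start := endp - PySem.Chars.len (ps.getD lo [])
       ((start, endp) : Int × Int)) := by
  cases hps : ps with
  | nil =>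
    simp [pvLoopA, pvEndsB, pvSearchB, PySem.Chars.len]
  | cons p rest =>
    rw [← hps]
    have hne : ps.length ≥ 1 := by rw [hps]; simp
    have hElen : (pvEndsB ps 0).length = ps.length := pvEndsB_length ps 0
    set r := cFirst (pvEndsB ps 0) pos with hr
    have hrle : r ≤ ps.length - 1 := by
      have := cFirst_le (pvEndsB ps 0) pos
      omega
    have hrlt : r < ps.length := by omega
    have hsearch : pvSearchB (pvEndsB ps 0) pos 0 (ps.length - 1) = r := by
      apply search_eq
      · exact cFirst_before (pvEndsB ps 0) pos
      · intro h; exact cFirst_stop (pvEndsB ps 0) pos (by omega)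
      · intro i j hij hj; exact pvEndsB_mono ps 0 i j hij (by omega)
      · omega
      · exact hrle
      · omega
    simp only [pvLoopA_eq_cFirst, ← hr, hsearch]
    rw [sumRange_eq_pSum ps r (by omega), pvEndsB_getD ps r 0 hrlt]
    simp only [Prod.mk.injEq]
    constructor <;> ring

-- ===== VERDICT (by name: the statement is the Claim_ definition above) =====
theorem find_paragraph_spec : Claim_equal_find_paragraph := by
  intro text position _
  show find_paragraph text position = find_paragraph_alt text position
  exact bodies_eq (PySem.Chars.splitOn text.toList ['\n']) position
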